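-- pv_equiv track=rewrite | github.com/Duskynetic/sdi_back-end-challenge-1 | functions.py | optimizedCost
-- ===== SOURCE A (Python) =====
-- def optimizedCost(seat_number):
--     # Definition of all options in a nested dictionary format
--     choices = {
--         'small': {'capacity': 5, 'cost': 5000},
--         'medium': {'capacity': 10, 'cost': 8000},
--         'large': {'capacity': 15, 'cost': 12000}
--     }
--
--     total_cost = {}
--     # Two-variable for-loop for convenient access to nested dictionary
--     for size, details in choices.items():
--         # Use integer division instead of normal division allows for the program to adjust to capacities
--         # that are not fully divisible by the given values
--         units_required = (seat_number + details['capacity'] - 1) // details['capacity']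
--         # Tabulate total number of units needed for each size option
--         total_cost[size] = units_required * details['cost']
--
--     # Determine the option with lowest costs as well as number of units needed
--     best_choice = min(total_cost, key=total_cost.get)
--     minimum_cost = total_cost[best_choice]
--     num_units = minimum_cost//choices[best_choice]['cost']
--
--     # Return optimal cost, best option, and units required
--     return best_choice, minimum_cost, num_units
-- ===== SOURCE B (Python) =====
-- def optimizedCost(seat_number):
--     # Closed-form via period-30 (lcm of capacities) residue decomposition:
--     # each option's cost is linear in q = seat_number // 30 plus a function of
--     # the residue r, so the winner is decided by a threshold test on q and a
--     # residue comparison -- no loop over options, no cost table, no min scan.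
--     q, r = divmod(seat_number, 30)
--     S = 5000 * ((r + 4) // 5)     # small-bus cost at residue r
--     M = 8000 * ((r + 9) // 10)    # medium-bus cost at residue r
--     L = 12000 * ((r + 14) // 15)  # large-bus cost at residue r
--     if 6000 * q + S <= M and 6000 * q + S <= L:
--         return 'small', 30000 * q + S, 6 * q + S // 5000
--     if M <= L:
--         return 'medium', 24000 * q + M, 3 * q + M // 8000
--     return 'large', 24000 * q + L, 2 * q + L // 12000
-- ===== Notes on version B (the rewrite author's own statement) =====
-- stated objective: alternative
-- what changed: Replaced A's per-option ceil-cost table plus min-scan with a closed-form residue decomposition at the period given by the lcm of the capacities: each cost is linear in the quotient plus a residue term, so the winner falls out of one threshold test on the quotient and one residue comparison, with no loop over options and no min over computed totals.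
import Mathlib
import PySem

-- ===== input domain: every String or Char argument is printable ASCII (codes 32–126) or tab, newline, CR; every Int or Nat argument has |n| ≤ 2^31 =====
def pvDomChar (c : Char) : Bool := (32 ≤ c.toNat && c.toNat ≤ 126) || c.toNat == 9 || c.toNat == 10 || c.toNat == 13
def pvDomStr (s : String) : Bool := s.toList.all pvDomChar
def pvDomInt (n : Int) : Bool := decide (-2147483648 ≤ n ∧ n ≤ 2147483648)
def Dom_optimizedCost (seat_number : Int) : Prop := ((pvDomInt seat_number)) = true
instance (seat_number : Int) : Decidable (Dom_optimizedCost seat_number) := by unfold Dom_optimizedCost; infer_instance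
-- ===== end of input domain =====

-- B replaces A's cost-table-and-min-scan with a closed-form period-30 residue decomposition (objective: alternative).

-- ===== PORT A =====
def optimizedCost (seat_number : Int) : String × Int × Int :=
  let choices : PySem.Dict String (Int × Int) :=
    PySem.Dict.ofList [("small", (5, 5000)), ("medium", (10, 8000)), ("large", (15, 12000))]
  let total_cost : PySem.Dict String Int :=
    choices.items.foldl (fun d p =>
      let units_required := PySem.Int.floordiv (seat_number + p.2.1 - 1) p.2.1
      d.insert p.1 (units_required * p.2.2)) PySem.Dict.empty
  match PySem.List.min? total_cost.keys (fun k => (total_cost.get? k).getD 0) with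
  | none => ("", 0, 0)   -- unreachable: total_cost always has three keys (Python min would raise only on an empty dict)
  | some best_choice =>
    let minimum_cost := (total_cost.get? best_choice).getD 0
    let num_units := PySem.Int.floordiv minimum_cost ((choices.get? best_choice).getD (0, 0)).2
    (best_choice, minimum_cost, num_units)

-- ===== PORT B =====
def optimizedCost_alt (seat_number : Int) : String × Int × Int :=
  let q := PySem.Int.floordiv seat_number 30
  let r := PySem.Int.mod seat_number 30
  let S := 5000 * PySem.Int.floordiv (r + 4) 5
  let M := 8000 * PySem.Int.floordiv (r + 9) 10
  let L := 12000 * PySem.Int.floordiv (r + 14) 15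
  if 6000 * q + S ≤ M ∧ 6000 * q + S ≤ L then
    ("small", 30000 * q + S, 6 * q + PySem.Int.floordiv S 5000)
  else if M ≤ L then
    ("medium", 24000 * q + M, 3 * q + PySem.Int.floordiv M 8000)
  else
    ("large", 24000 * q + L, 2 * q + PySem.Int.floordiv L 12000)

-- ===== PRECONDITION & SPEC =====
def Spec_optimizedCost (seat_number : Int) (out : String × Int × Int) : Prop := out = optimizedCost_alt seat_number
instance (seat_number : Int) (out : String × Int × Int) : Decidable (Spec_optimizedCost seat_number out) := by unfold Spec_optimizedCost; infer_instance

-- ===== CLAIM =====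
def Claim_equal_optimizedCost : Prop := ∀ (seat_number : Int), Dom_optimizedCost seat_number → Spec_optimizedCost seat_number (optimizedCost seat_number)

-- ===== LEMMAS AND PROOFS =====

-- ===== VERDICT =====
theorem optimizedCost_spec : Claim_equal_optimizedCost := by
  intro s _
  unfold Spec_optimizedCost optimizedCost optimizedCost_alt
  rw [PySem.Int.mod_eq_emod_of_pos (by norm_num : (0:Int) < 30)]
  simp only [PySem.Int.floordiv_eq_ediv_of_pos (by norm_num : (0:Int) < 5),
    PySem.Int.floordiv_eq_ediv_of_pos (by norm_num : (0:Int) < 10),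
    PySem.Int.floordiv_eq_ediv_of_pos (by norm_num : (0:Int) < 15),
    PySem.Int.floordiv_eq_ediv_of_pos (by norm_num : (0:Int) < 30),
    PySem.Int.floordiv_eq_ediv_of_pos (by norm_num : (0:Int) < 5000),
    PySem.Int.floordiv_eq_ediv_of_pos (by norm_num : (0:Int) < 8000),
    PySem.Int.floordiv_eq_ediv_of_pos (by norm_num : (0:Int) < 12000)]
  simp [PySem.Dict.ofList, PySem.Dict.insert, PySem.Dict.get?, PySem.Dict.keys, PySem.List.min?,
    List.foldl, PySem.Dict.empty, PySem.Dict.update, PySem.Dict.contains, List.find?, List.map]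
  have h5 : (s + 5 - 1) / 5 = 6 * (s / 30) + (s % 30 + 4) / 5 := by omega
  have h10 : (s + 10 - 1) / 10 = 3 * (s / 30) + (s % 30 + 9) / 10 := by omega
  have h15 : (s + 15 - 1) / 15 = 2 * (s / 30) + (s % 30 + 14) / 15 := by omega
  rw [h5, h10, h15]
  split_ifs <;>
    simp [PySem.Int.floordiv_eq_ediv_of_pos (show (0:Int) < 5000 by norm_num),
      PySem.Int.floordiv_eq_ediv_of_pos (show (0:Int) < 8000 by norm_num),
      PySem.Int.floordiv_eq_ediv_of_pos (show (0:Int) < 12000 by norm_num),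
      Prod.ext_iff] <;>
    first
      | omega
      | (split_ifs <;>
          simp [PySem.Int.floordiv_eq_ediv_of_pos (show (0:Int) < 5000 by norm_num),
            PySem.Int.floordiv_eq_ediv_of_pos (show (0:Int) < 8000 by norm_num),
            PySem.Int.floordiv_eq_ediv_of_pos (show (0:Int) < 12000 by norm_num),
            Prod.ext_iff] <;>
          omega)
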